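-- pv_equiv track=rewrite | github.com/rkv-freelancer/carbon-aware-dashboard | demo_revised.py | create_file_patterns
-- ===== SOURCE A (Python) =====
-- def create_file_patterns(base_pattern, models=None, regions=None):
--     """
--     Create glob patterns for file matching
--
--     Returns list of patterns like:
--     - If both specified: ["bart_small_us_west_1_performance.json", ...]
--     - If regions only: ["*_us_west_1_performance.json", ...]
--     - If models only: ["bart_small_*_performance.json", ...]
--     - If neither: ["*_performance.json"]
--     """
--     patterns = []
--
--     if models and regions:
--         # Both specified: create specific combinations
--         for model in models:
--             model_safe = model.replace('/', '_').replace('-', '_')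
--             for region in regions:
--                 pattern = f"{model_safe}_{region}_{base_pattern}"
--                 patterns.append(pattern)
--     elif regions:
--         # Only regions specified
--         for region in regions:
--             pattern = f"*_{region}_{base_pattern}"
--             patterns.append(pattern)
--     elif models:
--         # Only models specified
--         for model in models:
--             model_safe = model.replace('/', '_').replace('-', '_')
--             pattern = f"{model_safe}_*_{base_pattern}"
--             patterns.append(pattern)
--     else:
--         # Neither specified: match all
--         patterns.append(f"*_{base_pattern}")
--
--     return patterns
-- ===== SOURCE B (Python) =====
-- def create_file_patterns(base_pattern, models=None, regions=None):
--     if not models and not regions: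
--         return ["*_" + base_pattern]
--     ms = [m.replace('/', '_').replace('-', '_') for m in models] if models else ['*']
--     rs = list(regions) if regions else ['*']
--     n = len(rs)
--     out = []
--     for k in range(len(ms) * n):
--         out.append(f"{ms[k // n]}_{rs[k % n]}_{base_pattern}")
--     return out
-- ===== Notes on version B (the rewrite author's own statement) =====
-- stated objective: alternative
-- what changed: Replaces A's four branch-specific nested loops with a single flat loop over range(len(ms)*len(rs)) that recovers each (model, region) pair by divmod index arithmetic (k//n, k%n) from normalized token lists; only the neither-specified case stays a guard.
import Mathlib
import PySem

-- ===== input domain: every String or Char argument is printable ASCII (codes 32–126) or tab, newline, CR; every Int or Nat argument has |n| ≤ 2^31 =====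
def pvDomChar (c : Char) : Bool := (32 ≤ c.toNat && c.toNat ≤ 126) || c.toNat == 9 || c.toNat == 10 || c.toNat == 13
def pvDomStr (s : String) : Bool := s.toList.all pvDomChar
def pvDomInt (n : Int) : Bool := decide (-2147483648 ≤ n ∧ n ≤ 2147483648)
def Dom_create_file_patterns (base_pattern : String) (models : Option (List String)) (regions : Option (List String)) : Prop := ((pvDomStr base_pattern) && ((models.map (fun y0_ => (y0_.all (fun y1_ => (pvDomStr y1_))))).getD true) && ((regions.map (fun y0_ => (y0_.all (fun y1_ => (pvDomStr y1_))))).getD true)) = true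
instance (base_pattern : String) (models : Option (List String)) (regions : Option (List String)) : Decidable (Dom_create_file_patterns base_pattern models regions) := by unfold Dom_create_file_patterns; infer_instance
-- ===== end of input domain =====

-- B replaces A's four branch-specific nested loops by one flat loop over the product
-- size, recovering each (model, region) pair by divmod index arithmetic (objective: alternative).


-- ===== PORT A =====
-- truthiness of an Optional[list]: Some nonempty list
def pvTruthy (o : Option (List String)) : Bool := !(o.getD []).isEmpty
-- model.replace('/','_').replace('-','_')
def pvSafe (m : String) : String := PySem.Str.replace (PySem.Str.replace m "/" "_") "-" "_"

def create_file_patterns (base_pattern : String) (models : Option (List String)) (regions : Option (List String)) : List String :=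
  let patterns : List String := []
  if pvTruthy models && pvTruthy regions then
    (models.getD []).foldl (fun acc model =>
      let model_safe := pvSafe model
      (regions.getD []).foldl (fun acc2 region =>
        acc2 ++ [model_safe ++ "_" ++ region ++ "_" ++ base_pattern]) acc) patterns
  else if pvTruthy regions then
    (regions.getD []).foldl (fun acc region =>
      acc ++ ["*_" ++ region ++ "_" ++ base_pattern]) patterns
  else if pvTruthy models then
    (models.getD []).foldl (fun acc model =>
      acc ++ [pvSafe model ++ "_*_" ++ base_pattern]) patterns
  else
    patterns ++ ["*_" ++ base_pattern]

-- ===== PORT B =====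
-- B: one flat loop 'for k in range(len(ms) * n)', indexing ms[k // n] and rs[k % n].
-- The Python indices are always in range, so pyGetD with default "" is exact here.
def create_file_patterns_alt (base_pattern : String) (models : Option (List String)) (regions : Option (List String)) : List String :=
  if !pvTruthy models && !pvTruthy regions then ["*_" ++ base_pattern]
  else
    let ms := if pvTruthy models then (models.getD []).map pvSafe else ["*"]
    let rs := if pvTruthy regions then regions.getD [] else ["*"]
    let n : Int := rs.length
    (PySem.List.pyRange 0 ((ms.length : Int) * n) 1).foldl
      (fun acc k =>
        acc ++ [PySem.List.pyGetD ms (PySem.Int.floordiv k n) "" ++ "_" ++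
                PySem.List.pyGetD rs (PySem.Int.mod k n) "" ++ "_" ++ base_pattern]) []

-- ===== PRECONDITION & SPEC =====
def Spec_create_file_patterns (base_pattern : String) (models : Option (List String)) (regions : Option (List String)) (out : List String) : Prop := out = create_file_patterns_alt base_pattern models regions
instance (base_pattern : String) (models : Option (List String)) (regions : Option (List String)) (out : List String) : Decidable (Spec_create_file_patterns base_pattern models regions out) := by unfold Spec_create_file_patterns; infer_instance

-- ===== CLAIM =====
def Claim_equal_create_file_patterns : Prop := ∀ (base_pattern : String) (models : Option (List String)) (regions : Option (List String)), Dom_create_file_patterns base_pattern models regions → Spec_create_file_patterns base_pattern models regions (create_file_patterns base_pattern models regions)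

-- ===== LEMMAS AND PROOFS =====
-- foldl appending singletons is a map
theorem pv_foldl_app {α β : Type} (f : α → β) (l : List α) (acc : List β) :
    l.foldl (fun a x => a ++ [f x]) acc = acc ++ l.map f := by
  induction l generalizing acc <;> simp_all

-- A's nested foldl is the flatMap of the product
theorem pv_nested_foldl {α β γ : Type} (g : α → β → γ) (ms : List α) (rs : List β)
    (acc : List γ) :
    ms.foldl (fun a m => rs.foldl (fun a2 r => a2 ++ [g m r]) a) acc
      = acc ++ ms.flatMap (fun m => rs.map (g m)) := by
  induction ms generalizing acc with
  | nil => simp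
  | cons m t ih =>
    rw [List.foldl_cons, ih, pv_foldl_app]
    simp [List.append_assoc]

theorem pv_map_getD_range {α β : Type} (xs : List α) (d : α) (g : α → β) :
    (List.range xs.length).map (fun k => g (xs.getD k d)) = xs.map g := by
  induction xs with
  | nil => simp
  | cons x t ih =>
    simp only [List.length_cons, List.range_succ_eq_map, List.map_cons, List.map_map,
      Function.comp_def, List.getD_cons_zero, List.getD_cons_succ]
    rw [ih]

-- B's divmod enumeration of range(|ms|*|rs|) is the flatMap of the product
theorem pv_range_divmod {α : Type} (ms rs : List α) (d : α) (f : α → α → α) :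
    (List.range (ms.length * rs.length)).map
        (fun k => f (ms.getD (k / rs.length) d) (rs.getD (k % rs.length) d))
      = ms.flatMap (fun m => rs.map (f m)) := by
  rcases rs with _ | ⟨r, rt⟩
  · simp
  induction ms with
  | nil => simp
  | cons m t ih =>
    have hn : 0 < (r :: rt).length := by simp
    have hsplit : (m :: t).length * (r :: rt).length
        = (r :: rt).length + t.length * (r :: rt).length := by
      simp [Nat.succ_mul, Nat.add_comm]
    have e1 : ∀ k ∈ List.range (r :: rt).length,
        f ((m :: t).getD (k / (r :: rt).length) d) ((r :: rt).getD (k % (r :: rt).length) d)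
          = f m ((r :: rt).getD k d) := by
      intro k hk
      rw [List.mem_range] at hk
      rw [Nat.div_eq_of_lt hk, Nat.mod_eq_of_lt hk]; rfl
    have e2 : ∀ k ∈ List.range (t.length * (r :: rt).length),
        f ((m :: t).getD (((r :: rt).length + k) / (r :: rt).length) d)
          ((r :: rt).getD (((r :: rt).length + k) % (r :: rt).length) d)
          = f (t.getD (k / (r :: rt).length) d) ((r :: rt).getD (k % (r :: rt).length) d) := by
      intro k _
      rw [Nat.add_comm (r :: rt).length k, Nat.add_div_right _ hn, Nat.add_mod_right,
        List.getD_cons_succ]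
    rw [hsplit, List.range_add, List.map_append, List.map_map]
    simp only [Function.comp_def]
    rw [List.map_congr_left e1, List.map_congr_left e2, ih,
      pv_map_getD_range (r :: rt) d (f m), List.flatMap_cons]

theorem pv_star_us (s : String) : ("*_" : String) ++ s = "*" ++ ("_" ++ s) := by
  rw [← String.append_assoc]; rfl

theorem pv_us_star_us (s : String) : ("_*_" : String) ++ s = "_" ++ ("*" ++ ("_" ++ s)) := by
  rw [← String.append_assoc, ← String.append_assoc]; rfl

-- B's port reduces to the flatMap normal form
theorem pv_alt_eq_flatMap (bp : String) (ms rs : List String) :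
    (PySem.List.pyRange 0 ((ms.length : Int) * (rs.length : Int)) 1).foldl
        (fun acc k =>
          acc ++ [PySem.List.pyGetD ms (PySem.Int.floordiv k (rs.length : Int)) "" ++ "_" ++
                  PySem.List.pyGetD rs (PySem.Int.mod k (rs.length : Int)) "" ++ "_" ++ bp]) []
      = ms.flatMap (fun m => rs.map (fun r => m ++ "_" ++ r ++ "_" ++ bp)) := by
  have hcast : (ms.length : Int) * (rs.length : Int) = ((ms.length * rs.length : Nat) : Int) := by
    push_cast; ring
  rw [hcast, PySem.List.pyRange_one, List.foldl_map, pv_foldl_app, List.nil_append]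
  have e : ∀ k ∈ List.range ((((ms.length * rs.length : Nat) : Int) - 0).toNat),
      (PySem.List.pyGetD ms (PySem.Int.floordiv ((0 : Int) + (k : Int)) (rs.length : Int)) "" ++ "_" ++
       PySem.List.pyGetD rs (PySem.Int.mod ((0 : Int) + (k : Int)) (rs.length : Int)) "" ++ "_" ++ bp)
        = ms.getD (k / rs.length) "" ++ "_" ++ rs.getD (k % rs.length) "" ++ "_" ++ bp := by
    intro k _
    rw [Int.zero_add, PySem.Int.floordiv_natCast, PySem.Int.mod_natCast,
      PySem.List.pyGetD_natCast, PySem.List.pyGetD_natCast]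
  rw [List.map_congr_left e]
  have hlen : ((((ms.length * rs.length : Nat) : Int) - 0).toNat) = ms.length * rs.length := by
    simp only [Int.sub_zero, Int.toNat_natCast]
  rw [hlen]
  exact pv_range_divmod ms rs "" (fun m r => m ++ "_" ++ r ++ "_" ++ bp)

-- ===== VERDICT =====
theorem create_file_patterns_spec : Claim_equal_create_file_patterns := by
  intro bp models regions _
  show create_file_patterns bp models regions = create_file_patterns_alt bp models regions
  unfold create_file_patterns create_file_patterns_alt
  by_cases hm : pvTruthy models = true <;> by_cases hr : pvTruthy regions = true <;>
    simp only [hm, hr, Bool.not_true, Bool.not_false, Bool.and_self, Bool.and_false,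
      Bool.and_true, ite_true]
  · -- both truthy
    rw [pv_alt_eq_flatMap, pv_nested_foldl, List.nil_append]
    simp [String.append_assoc, List.flatMap_map]
  · -- models only
    rw [pv_alt_eq_flatMap, pv_foldl_app, List.nil_append]
    simp [String.append_assoc, pv_us_star_us, List.flatMap_def, List.map_map, Function.comp_def]
  · -- regions only
    rw [pv_alt_eq_flatMap, pv_foldl_app, List.nil_append]
    simp [String.append_assoc, pv_star_us, List.flatMap_def]
  · rfl
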